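-- pv_equiv track=rewrite | github.com/ShuyangCao/cliff_summ | data_construction/neg_syslowcon/syslowcon_scripts/get_output.py | find_consecutive_pos
-- ===== SOURCE A (Python) =====
-- def find_consecutive_pos(poses):
--     current_pos = None
--     current_idx = None
--     new_poses = []
--     map_first = []
--     for i, pos in enumerate(poses):
--         pos = pos if pos in ['PROPN', 'NUM'] else 'OTHER'
--         if pos == current_pos:
--             new_poses.append('OTHER')
--             map_first.append(current_idx)
--         else:
--             new_poses.append(pos)
--             current_pos = pos
--             current_idx = i
--             map_first.append(current_idx)
--     return new_poses, map_first
-- ===== SOURCE B (Python) =====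
-- def _runs(norm):
--     """Run-length encode: list of (tag, run_length) pairs."""
--     runs = []
--     i, n = 0, len(norm)
--     while i < n:
--         j = i + 1
--         while j < n and norm[j] == norm[i]:
--             j += 1
--         runs.append((norm[i], j - i))
--         i = j
--     return runs
--
--
-- def find_consecutive_pos(poses):
--     norm = ['PROPN' if p == 'PROPN' else 'NUM' if p == 'NUM' else 'OTHER'
--             for p in poses]
--     new_poses, map_first = [], []
--     start = 0
--     for key, length in _runs(norm):
--         new_poses.append(key)
--         new_poses.extend(['OTHER'] * (length - 1))
--         map_first.extend([start] * length)
--         start += length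
--     return new_poses, map_first
-- ===== Notes on version B (the rewrite author's own statement) =====
-- stated objective: alternative
-- what changed: A threads current_pos/current_idx state through one element-wise loop; B run-length encodes the normalized tag sequence into (tag, length) runs and then expands each run into its output segment (key + 'OTHER'*(len-1), start repeated len times) while tracking the cumulative offset.
import Mathlib
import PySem

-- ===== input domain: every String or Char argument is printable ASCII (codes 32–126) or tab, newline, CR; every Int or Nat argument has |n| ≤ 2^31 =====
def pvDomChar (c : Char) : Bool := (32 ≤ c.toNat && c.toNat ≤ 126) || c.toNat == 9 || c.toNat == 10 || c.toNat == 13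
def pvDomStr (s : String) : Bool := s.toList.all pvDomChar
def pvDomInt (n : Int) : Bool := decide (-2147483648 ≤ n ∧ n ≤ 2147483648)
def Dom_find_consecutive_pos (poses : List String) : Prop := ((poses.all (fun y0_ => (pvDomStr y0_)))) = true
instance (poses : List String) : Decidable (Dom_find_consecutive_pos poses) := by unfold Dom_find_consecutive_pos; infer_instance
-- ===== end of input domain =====

-- B replaces A's stateful element-wise loop by run-length encoding the normalized tags and
-- expanding each (tag, length) run into its output segment; same cost, alternative structure.

-- ===== PORT A =====
-- A's loop: state (current_pos, current_idx), index i; builds new_poses and map_first front-to-back.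
-- current_idx is only read when pos = current_pos, which forces current_idx ≠ none; getD 0 is unreachable.
def pvALoop (currentPos : Option String) (currentIdx : Option Int) (i : Nat) :
    List String → List String × List Int
  | [] => ([], [])
  | p :: rest =>
    let pos := if p = "PROPN" ∨ p = "NUM" then p else "OTHER"
    if some pos = currentPos then
      let r := pvALoop currentPos currentIdx (i + 1) rest
      ("OTHER" :: r.1, currentIdx.getD 0 :: r.2)
    else
      let r := pvALoop (some pos) (some (i : Int)) (i + 1) rest
      (pos :: r.1, (i : Int) :: r.2)

def find_consecutive_pos (poses : List String) : List String × List Int :=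
  pvALoop none none 0 poses

-- ===== PORT B =====
-- Source B's chained conditional normalization.
def pvNorm (p : String) : String :=
  if p = "PROPN" then "PROPN" else if p = "NUM" then "NUM" else "OTHER"

-- Source B's _runs: the inner while "scan j forward while equal" is takeWhile/dropWhile on the tail.
def pvRuns : List String → List (String × Nat)
  | [] => []
  | t :: rest =>
    (t, (rest.takeWhile (fun x => x = t)).length + 1) :: pvRuns (rest.dropWhile (fun x => x = t))
termination_by l => l.length
decreasing_by
  exact Nat.lt_succ_of_le (List.length_dropWhile_le (fun x => decide (x = t)) rest)

-- Source B's expansion loop over the runs, carrying the cumulative offset `start`.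
def pvExpand (start : Nat) : List (String × Nat) → List String × List Int
  | [] => ([], [])
  | (k, len) :: rs =>
    let r := pvExpand (start + len) rs
    (k :: (List.replicate (len - 1) "OTHER" ++ r.1),
     List.replicate len ((start : Nat) : Int) ++ r.2)

def find_consecutive_pos_alt (poses : List String) : List String × List Int :=
  pvExpand 0 (pvRuns (poses.map pvNorm))

-- ===== PRECONDITION & SPEC =====
def Spec_find_consecutive_pos (poses : List String) (out : List String × List Int) : Prop := out = find_consecutive_pos_alt poses
instance (poses : List String) (out : List String × List Int) : Decidable (Spec_find_consecutive_pos poses out) := by unfold Spec_find_consecutive_pos; infer_instance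

-- ===== CLAIM (what is proved, stated in full; the proofs are below) =====
def Claim_equal_find_consecutive_pos : Prop := ∀ (poses : List String), Dom_find_consecutive_pos poses → Spec_find_consecutive_pos poses (find_consecutive_pos poses)

-- ===== LEMMAS AND PROOFS =====

-- A's inline normalization equals pvNorm.
theorem pvNorm_eq (p : String) : (if p = "PROPN" ∨ p = "NUM" then p else "OTHER") = pvNorm p := by
  unfold pvNorm; split_ifs with h h1 h2 <;> simp_all

-- A's loop, rephrased over the already-normalized list (proof-side helper).
def pvSpecLoop (prev : String) (pidx : Int) (i : Nat) : List String → List String × List Int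
  | [] => ([], [])
  | t :: rest =>
    if t = prev then
      let r := pvSpecLoop prev pidx (i + 1) rest
      ("OTHER" :: r.1, pidx :: r.2)
    else
      let r := pvSpecLoop t (i : Int) (i + 1) rest
      (t :: r.1, (i : Int) :: r.2)

theorem pvALoop_eq_spec (l : List String) : ∀ (prev : String) (pidx : Int) (i : Nat),
    pvALoop (some prev) (some pidx) i l = pvSpecLoop prev pidx i (l.map pvNorm) := by
  induction l with
  | nil => intro prev pidx i; rfl
  | cons p rest ih =>
    intro prev pidx i
    simp only [pvALoop, pvSpecLoop, List.map_cons, pvNorm_eq]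
    by_cases h : pvNorm p = prev
    · rw [if_pos (congrArg some h), if_pos h, ih]; rfl
    · rw [if_neg (fun hh => h (Option.some.inj hh)), if_neg h, ih]

-- consuming a block of elements all equal to the current state emits "OTHER"/pidx for each.
theorem pvSpec_consume (same : List String) : ∀ (prev : String) (pidx : Int) (i : Nat)
    (other : List String), (∀ x ∈ same, x = prev) →
    pvSpecLoop prev pidx i (same ++ other) =
      (List.replicate same.length "OTHER" ++ (pvSpecLoop prev pidx (i + same.length) other).1,
       List.replicate same.length pidx ++ (pvSpecLoop prev pidx (i + same.length) other).2) := by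
  induction same with
  | nil => intro prev pidx i other _; simp
  | cons s ss ih =>
    intro prev pidx i other h
    have hs : s = prev := h s (by simp)
    simp only [List.cons_append, pvSpecLoop, if_pos hs]
    rw [ih prev pidx (i + 1) other (fun x hx => h x (by simp [hx]))]
    have harith : i + 1 + ss.length = i + (ss.length + 1) := by omega
    simp [List.replicate_succ, harith]

-- entering a fresh element (≠ current state) produces exactly the run expansion from there on.
theorem pvSpec_fresh (n : Nat) : ∀ (ns : List String), ns.length ≤ n →
    ∀ (prev : String) (pidx : Int) (i : Nat), (∀ t, ns.head? = some t → t ≠ prev) →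
    pvSpecLoop prev pidx i ns = pvExpand i (pvRuns ns) := by
  induction n with
  | zero =>
    intro ns hlen _ _ _ _
    have : ns = [] := List.eq_nil_of_length_eq_zero (Nat.le_zero.mp hlen)
    subst this; simp [pvSpecLoop, pvRuns, pvExpand]
  | succ n ih =>
    intro ns hlen prev pidx i hfresh
    cases ns with
    | nil => simp [pvSpecLoop, pvRuns, pvExpand]
    | cons t tl =>
      have ht : t ≠ prev := hfresh t rfl
      simp only [pvSpecLoop, if_neg ht]
      have hsplit : tl = tl.takeWhile (fun x => x = t) ++ tl.dropWhile (fun x => x = t) :=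
        (List.takeWhile_append_dropWhile).symm
      have hall : ∀ x ∈ tl.takeWhile (fun x => x = t), x = t := by
        intro x hx
        simpa using List.mem_takeWhile_imp hx
      have hdrop : ∀ u, (tl.dropWhile (fun x => x = t)).head? = some u → u ≠ t := by
        intro u hu
        have := List.head?_dropWhile_not (p := fun x => x = t) (l := tl)
        rw [hu] at this
        simpa using this
      have hdl : (tl.dropWhile (fun x => x = t)).length ≤ n := by
        have h1 := List.length_dropWhile_le (fun x => x = t) tl
        simp at hlen; omega
      conv_lhs => rw [hsplit]
      rw [pvSpec_consume _ t (i : Int) (i + 1) _ hall,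
          ih _ hdl t (i : Int) _ hdrop]
      have harith : i + 1 + (tl.takeWhile (fun x => decide (x = t))).length
          = i + ((tl.takeWhile (fun x => decide (x = t))).length + 1) := by omega
      rw [harith]
      rw [pvRuns]
      simp [pvExpand, List.replicate_succ]

-- ===== VERDICT (by name: the statement is the Claim_ definition above) =====
theorem find_consecutive_pos_spec : Claim_equal_find_consecutive_pos := by
  intro poses _
  unfold Spec_find_consecutive_pos find_consecutive_pos find_consecutive_pos_alt
  cases poses with
  | nil => simp [pvALoop, pvRuns, pvExpand]
  | cons p rest =>
    have hne : pvNorm p ≠ "" := by unfold pvNorm; split_ifs <;> simp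
    have key : pvALoop none none 0 (p :: rest) =
        pvSpecLoop "" 0 0 ((p :: rest).map pvNorm) := by
      simp only [pvALoop, pvSpecLoop, List.map_cons, pvNorm_eq]
      rw [if_neg (by simp), if_neg hne, pvALoop_eq_spec]
    rw [key, pvSpec_fresh ((p :: rest).map pvNorm).length _ le_rfl _ _ _
        (by intro t ht; simp at ht; subst ht; exact hne)]
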